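-- pv_equiv track=rewrite | github.com/Auzzy/18xx-routes | routes18xx/tiles.py | _calc_paths
-- ===== SOURCE A (Python) =====
-- import collections
-- import itertools
--
-- def _calc_paths(edges):
--     paths = collections.defaultdict(list)
--     for exits in edges:
--         if isinstance(exits, list):
--             for path in itertools.permutations(exits, 2):
--                 paths[path[0]].append(path[1])
--         else:
--             paths[exits] = []
--     return paths
-- ===== SOURCE B (Python) =====
-- import collections
--
--
-- def _calc_paths(edges):
--     # Staged group-by-key algorithm: one pass builds an occurrence index
--     # (key -> list of (edge, position) in first-occurrence order), then each
--     # key's entire adjacency list is materialised in a single comprehension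
--     # and assigned once, instead of streaming ordered pairs into the dict.
--     paths = collections.defaultdict(list)
--     occ = {}
--     for exits in edges:
--         if isinstance(exits, list):
--             if len(exits) > 1:
--                 for i, x in enumerate(exits):
--                     occ.setdefault(x, []).append((exits, i))
--         else:
--             paths[exits] = []
--     for key, places in occ.items():
--         paths[key] = [y for exits, i in places for y in exits[:i] + exits[i + 1:]]
--     return paths
-- ===== Notes on version B (the rewrite author's own statement) =====
-- stated objective: alternative
-- what changed: Replaces A's streaming of itertools.permutations pairs into a growing defaultdict with a staged group-by-key algorithm: one pass builds an occurrence index key -> [(edge, position)...], then each key's entire adjacency list is materialised in a single comprehension and assigned once.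
import Mathlib
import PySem

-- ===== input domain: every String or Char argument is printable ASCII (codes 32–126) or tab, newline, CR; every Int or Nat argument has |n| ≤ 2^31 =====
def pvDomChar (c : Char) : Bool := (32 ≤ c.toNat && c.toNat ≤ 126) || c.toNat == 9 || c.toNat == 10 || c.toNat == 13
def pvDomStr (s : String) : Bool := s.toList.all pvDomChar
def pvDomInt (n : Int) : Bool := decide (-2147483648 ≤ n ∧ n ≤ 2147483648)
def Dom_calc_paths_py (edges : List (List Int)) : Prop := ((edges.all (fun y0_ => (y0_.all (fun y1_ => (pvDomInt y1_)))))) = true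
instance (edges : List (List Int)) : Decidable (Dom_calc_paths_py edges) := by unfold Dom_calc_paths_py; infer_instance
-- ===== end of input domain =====

-- B replaces A's streaming of ordered exit pairs into a growing defaultdict by a
-- staged group-by-key algorithm: one pass builds an occurrence index, then each
-- key's whole adjacency list is built at once (objective: alternative, same cost).
-- (On the typed domain List (List Int) every element is a list, so A's non-list
-- branch 'paths[exits] = []' is unreachable and not ported; likewise B's non-list
-- branch is a no-op here and not ported.)

-- ===== PORT A =====
-- path[0] / path[1]: each tuple from permutations(exits, 2) has length 2 and the
-- indices are literal non-negative in-range ints, so List.getD is exact here.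
def calc_paths_py (edges : List (List Int)) : List (Int × List Int) :=
  (edges.foldl (fun paths exits =>
      (PySem.List.permutations exits 2).foldl
        (fun d path => d.modify (path.getD 0 0) [] (fun l => l ++ [path.getD 1 0])) paths)
    PySem.Dict.empty).items

-- ===== PORT B =====
-- occ.setdefault(x, []).append((exits, i)) is d.modify x [] (· ++ [(exits, i)]);
-- the final comprehension flattens exits[:i] + exits[i+1:] over each key's places.
def calc_paths_py_alt (edges : List (List Int)) : List (Int × List Int) :=
  let occ : PySem.Dict Int (List (List Int × Int)) :=
    edges.foldl (fun d exits =>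
      if 1 < exits.length then
        (PySem.List.enumerate exits).foldl
          (fun d ix => d.modify ix.2 [] (fun l => l ++ [(exits, ix.1)])) d
      else d) PySem.Dict.empty
  (occ.items.foldl (fun paths kv =>
      paths.insert kv.1 (kv.2.flatMap (fun pi =>
        PySem.List.slice pi.1 none (some pi.2) ++ PySem.List.slice pi.1 (some (pi.2 + 1)) none)))
    PySem.Dict.empty).items

-- ===== PRECONDITION & SPEC =====
def Spec_calc_paths_py (edges : List (List Int)) (out : List (Int × List Int)) : Prop := out = calc_paths_py_alt edges
instance (edges : List (List Int)) (out : List (Int × List Int)) : Decidable (Spec_calc_paths_py edges out) := by unfold Spec_calc_paths_py; infer_instance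

-- ===== CLAIM =====
def Claim_equal_calc_paths_py : Prop := ∀ (edges : List (List Int)), Dom_calc_paths_py edges → Spec_calc_paths_py edges (calc_paths_py edges)

-- ===== LEMMAS AND PROOFS =====

-- itertools.permutations(e, 2), index-free: for each position i, e[i] consed onto
-- each element of e with position i removed.
theorem permutations_two (e : List Int) :
    PySem.List.permutations e 2
      = (List.range e.length).flatMap (fun i => (e.eraseIdx i).map (fun b => [e.getD i 0, b])) := by
  rw [PySem.List.permutations]
  simp only [PySem.List.permutations]
  apply List.flatMap_congr
  intro i hi
  rw [List.mem_range] at hi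
  rw [List.getElem?_eq_getElem hi, List.getD_eq_getElem e 0 hi]
  simp only []
  generalize (e.eraseIdx i) = ys
  induction ys with
  | nil => rfl
  | cons y t ih =>
    rw [List.length_cons, List.range_succ_eq_map, List.flatMap_cons, List.flatMap_map]
    simp only [List.getElem?_cons_succ, List.getElem?_cons_zero, List.map_cons, List.map_append]
    rw [← ih]
    simp

-- the ordered pairs A streams, per edge
def pairsOf (e : List Int) : List (Int × Int) :=
  (PySem.List.permutations e 2).map (fun p => (p.getD 0 0, p.getD 1 0))

theorem pairsOf_eq (e : List Int) :
    pairsOf e = (List.range e.length).flatMap (fun i => (e.eraseIdx i).map (fun b => (e.getD i 0, b))) := by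
  unfold pairsOf
  rw [permutations_two, List.map_flatMap]
  simp [List.map_map, Function.comp_def]

-- the seconds of the pairs of e whose first component is k, index-free
def selA (e : List Int) (k : Int) : List Int :=
  (List.range e.length).flatMap (fun i => if e.getD i 0 = k then e.eraseIdx i else [])

theorem filter_map_pairsOf (e : List Int) (k : Int) :
    ((pairsOf e).filter (fun p => p.1 == k)).map (fun p => p.2) = selA e k := by
  rw [pairsOf_eq, List.filter_flatMap, List.map_flatMap]
  unfold selA
  apply List.flatMap_congr
  intro i _
  rw [List.filter_map]
  rw [List.getD_eq_getElem?_getD] at *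
  by_cases h : e[i]?.getD 0 = k
  · simp [h, Function.comp_def]
  · simp [h, Function.comp_def]

theorem selA_short (e : List Int) (k : Int) (h : ¬ 1 < e.length) : selA e k = [] := by
  match e, h with
  | [], _ => rfl
  | [a], _ => simp [selA, List.range_succ]
  | a :: b :: t, h => exact absurd (by simp) h

theorem enumerate_eq_range_map (e : List Int) (s : Int) :
    PySem.List.enumerate e s = (List.range e.length).map (fun i : Nat => ((s + (i : Int) : Int), e.getD i 0)) := by
  induction e generalizing s with
  | nil => rfl
  | cons y t ih =>
    rw [PySem.List.enumerate_cons, ih (s+1), List.length_cons, List.range_succ_eq_map, List.map_cons, List.map_map]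
    simp only [Nat.cast_zero, add_zero, List.getD_cons_zero]
    congr 1
    apply List.map_congr_left
    intro j _
    simp [Function.comp]
    omega

-- the complement list exits[:i] + exits[i+1:] summed over the occurrences of k in e
def complB (e : List Int) (k : Int) : List Int :=
  (PySem.List.enumerate e).flatMap (fun ix =>
    if ix.2 = k then PySem.List.slice e none (some ix.1) ++ PySem.List.slice e (some (ix.1 + 1)) none
    else [])

-- B's per-edge complement list is A's per-edge selection
theorem complB_eq_selA (e : List Int) (k : Int) : complB e k = selA e k := by
  unfold complB selA
  rw [enumerate_eq_range_map e 0, List.flatMap_map]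
  apply List.flatMap_congr
  intro i _
  rw [List.getD_eq_getElem?_getD]
  by_cases h : e[i]?.getD 0 = k
  · simp only [h, if_pos, zero_add]
    rw [show ((i : Int) + 1) = (((i + 1 : Nat)) : Int) by push_cast; ring]
    rw [PySem.List.slice_to_natCast, PySem.List.slice_from_natCast,
      List.eraseIdx_eq_take_drop_succ]
  · simp [h]

theorem flatMap_eq_flatMap_filter {α β : Type} (p : α → Bool) (g : α → List β) (l : List α)
    (hg : ∀ x ∈ l, ¬ p x = true → g x = []) : l.flatMap g = (l.filter p).flatMap g := by
  induction l with
  | nil => rfl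
  | cons x t ih =>
    rw [List.flatMap_cons, List.filter_cons]
    by_cases h : p x = true
    · rw [if_pos h, List.flatMap_cons, ih (fun y hy => hg y (List.mem_cons_of_mem x hy))]
    · rw [if_neg h, hg x (List.mem_cons_self) h, List.nil_append,
        ih (fun y hy => hg y (List.mem_cons_of_mem x hy))]

theorem flatMap_filter_eq {α β : Type} (p : α → Bool) (g : α → List β) (l : List α) :
    (l.filter p).flatMap g = l.flatMap (fun x => if p x then g x else []) := by
  induction l with
  | nil => rfl
  | cons x t ih =>
    rw [List.filter_cons, List.flatMap_cons]
    by_cases h : p x = true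
    · rw [if_pos h, if_pos h, List.flatMap_cons, ih]
    · rw [if_neg h, if_neg h, ih, List.nil_append]

-- folding Set.add over a constant nonempty list adds the constant once
theorem foldl_add_map_const (a : Int) (l : List Int) (s : PySem.Set Int) (h : l ≠ []) :
    (l.map (fun _ => a)).foldl PySem.Set.add s = PySem.Set.add s a := by
  induction l generalizing s with
  | nil => exact absurd rfl h
  | cons x t ih =>
    rw [List.map_cons, List.foldl_cons]
    cases t with
    | nil => rfl
    | cons y u =>
      rw [ih (s.add a) (by simp)]
      have : PySem.Set.add (s.add a) a = s.add a := by
        have hm : a ∈ s.add a := (PySem.Set.mem_add s a a).mpr (Or.inr rfl)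
        simp only [PySem.Set.add, PySem.Set.contains]
        by_cases hs : a ∈ s <;> simp [hs]
      rw [this]

theorem foldl_range_getD {δ : Type} (e : List Int) (g : δ → Int → δ) (s : δ) :
    (List.range e.length).foldl (fun s i => g s (e.getD i 0)) s = e.foldl g s := by
  have hmap : (List.range e.length).map (fun i => e.getD i 0) = e := by
    apply List.ext_getElem
    · simp
    · intro j h1 h2
      simp [List.getElem?_eq_getElem h2]
  conv_rhs => rw [← hmap]
  rw [List.foldl_map]

-- per edge: folding Set.add over the firsts of its pairs = folding it over the edge (if long enough)
theorem foldl_add_firsts (e : List Int) (s : PySem.Set Int) :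
    ((pairsOf e).map (fun p => p.1)).foldl PySem.Set.add s
      = (if 1 < e.length then e.foldl PySem.Set.add s else s) := by
  rw [pairsOf_eq, List.map_flatMap, List.foldl_flatMap]
  by_cases hl : 1 < e.length
  · rw [if_pos hl]
    have step : ∀ (i : Nat), i ∈ List.range e.length → ∀ (s : PySem.Set Int),
        ((((e.eraseIdx i).map (fun b => (e.getD i 0, b))).map (fun p => p.1)).foldl PySem.Set.add s)
          = PySem.Set.add s (e.getD i 0) := by
      intro i hi s
      rw [List.mem_range] at hi
      rw [List.map_map]
      apply foldl_add_map_const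
      intro hnil
      have := congrArg List.length hnil
      rw [List.length_eraseIdx] at this
      simp [hi] at this
      omega
    rw [PySem.List.foldl_congr_mem' (List.range e.length) _ (fun s i => PySem.Set.add s (e.getD i 0)) s step]
    exact foldl_range_getD e PySem.Set.add s
  · match e, hl with
    | [], _ => rfl
    | [a], _ => simp [List.range_succ]
    | a :: b :: t, h => exact absurd (by simp) h

-- lookup in B's insert fold (each inserted value depends only on its key)
theorem getD_foldl_insert_not_mem {ν : Type} (f : Int → List ν) (ks : List Int)
    (d : PySem.Dict Int (List ν)) (k : Int) (hk : k ∉ ks) :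
    (ks.foldl (fun d k => d.insert k (f k)) d).getD k [] = d.getD k [] := by
  induction ks generalizing d with
  | nil => rfl
  | cons a t ih =>
    rw [List.foldl_cons, ih _ (fun h => hk (List.mem_cons_of_mem a h)),
      PySem.Dict.getD_insert_of_ne]
    intro hka
    exact hk (hka ▸ List.mem_cons_self)

theorem getD_foldl_insert {ν : Type} (f : Int → List ν) (ks : List Int) (d : PySem.Dict Int (List ν))
    (k : Int) (hk : k ∈ ks) :
    (ks.foldl (fun d k => d.insert k (f k)) d).getD k [] = f k := by
  induction ks generalizing d with
  | nil => cases hk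
  | cons a t ih =>
    rw [List.foldl_cons]
    by_cases ht : k ∈ t
    · exact ih _ ht
    · have hak : k = a := by cases hk with | head => rfl | tail _ h => exact absurd h ht
      subst hak
      rw [getD_foldl_insert_not_mem f t _ k ht, PySem.Dict.getD_insert_self]

-- B's result, in canonical form: the deduplicated keys of the long edges, each
-- mapped to its concatenated per-edge complements
theorem altB (edges : List (List Int)) :
    calc_paths_py_alt edges
      = (PySem.List.dedup ((edges.filter (fun e => 1 < e.length)).flatMap id)).map
          (fun k => (k, (edges.filter (fun e => 1 < e.length)).flatMap (fun e => complB e k))) := by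
  unfold calc_paths_py_alt
  simp only []
  -- stage 1: the occ dict as a fold over the flattened (key, (edge, pos)) pairs
  have h1 : (edges.foldl (fun d exits =>
      if 1 < exits.length then
        (PySem.List.enumerate exits).foldl
          (fun d ix => d.modify ix.2 [] (fun l => l ++ [(exits, ix.1)])) d
      else d) PySem.Dict.empty)
      = ((edges.filter (fun e => 1 < e.length)).flatMap
          (fun e => (PySem.List.enumerate e).map (fun ix => (ix.2, (e, ix.1))))).foldl
          (fun d p => d.modify p.1 [] (fun l => l ++ [p.2])) PySem.Dict.empty := by
    rw [PySem.List.foldl_ite_eq_foldl_filter, List.foldl_flatMap]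
    apply PySem.List.foldl_congr_mem'
    intro e _ d
    rw [List.foldl_map]
  rw [h1]
  have hnodup : (((edges.filter (fun e => 1 < e.length)).flatMap
          (fun e => (PySem.List.enumerate e).map (fun ix => (ix.2, (e, ix.1))))).foldl
          (fun d p => d.modify p.1 [] (fun l => l ++ [p.2])) PySem.Dict.empty).keys.Nodup := by
    apply PySem.Dict.nodup_keys_foldl_modify_key _ Prod.fst [] (fun _ p => fun l => l ++ [p.2])
    simp [PySem.Dict.keys, PySem.Dict.empty]
  -- stage 2: fold of inserts over occ.items = map over occ.keys
  rw [PySem.Dict.items_eq_map_keys _ hnodup [], List.foldl_map]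
  set occ := (((edges.filter (fun e => 1 < e.length)).flatMap
          (fun e => (PySem.List.enumerate e).map (fun ix => (ix.2, (e, ix.1))))).foldl
          (fun d p => d.modify p.1 [] (fun l => l ++ [p.2])) PySem.Dict.empty) with hocc
  have hkeysB : ((occ.keys.foldl (fun d k => d.insert k ((occ.getD k []).flatMap (fun pi =>
        PySem.List.slice pi.1 none (some pi.2) ++ PySem.List.slice pi.1 (some (pi.2 + 1)) none)))
      PySem.Dict.empty)).keys = occ.keys := by
    rw [PySem.Dict.keys_foldl_insert]
    have hek : (PySem.Dict.empty : PySem.Dict Int (List Int)).keys = PySem.Set.empty := rfl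
    rw [hek, PySem.Set.update_empty]
    exact PySem.Set.ofList_eq_self_of_nodup _ hnodup
  rw [PySem.Dict.items_eq_map_keys _ (by rw [hkeysB]; exact hnodup) [], hkeysB]
  -- each key's value is its per-edge complement list
  have hval : ∀ k ∈ occ.keys,
      (k, (occ.keys.foldl (fun d k => d.insert k ((occ.getD k []).flatMap (fun pi =>
          PySem.List.slice pi.1 none (some pi.2) ++ PySem.List.slice pi.1 (some (pi.2 + 1)) none)))
        PySem.Dict.empty).getD k [])
      = (k, (edges.filter (fun e => 1 < e.length)).flatMap (fun e => complB e k)) := by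
    intro k hk
    rw [getD_foldl_insert _ _ _ k hk]
    have hget : occ.getD k [] = (edges.filter (fun e => 1 < e.length)).flatMap
        (fun e => ((PySem.List.enumerate e).filter (fun ix => ix.2 == k)).map (fun ix => (e, ix.1))) := by
      rw [hocc, PySem.Dict.getD_foldl_modify_append]
      have hempty : (PySem.Dict.empty : PySem.Dict Int (List (List Int × Int))).getD k [] = [] := rfl
      rw [hempty, List.nil_append, List.filter_flatMap, List.map_flatMap]
      apply List.flatMap_congr
      intro e _
      rw [List.filter_map, List.map_map]
      rfl
    rw [hget, List.flatMap_assoc]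
    apply congrArg
    apply List.flatMap_congr
    intro e _
    rw [List.flatMap_map, flatMap_filter_eq]
    unfold complB
    apply List.flatMap_congr
    intro ix _
    by_cases h : ix.2 = k
    · simp [h]
    · simp [h]
  rw [List.map_congr_left hval]
  -- the keys of occ are the deduplicated flattened long edges
  have hoccKeys : occ.keys = PySem.List.dedup ((edges.filter (fun e => 1 < e.length)).flatMap id) := by
    rw [hocc, PySem.Dict.keys_foldl_modify_key _ Prod.fst [] (fun _ p => fun l => l ++ [p.2])]
    have hek : (PySem.Dict.empty : PySem.Dict Int (List (List Int × Int))).keys = PySem.Set.empty := rfl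
    rw [hek, PySem.Set.update_empty, PySem.List.dedup_eq_ofList, List.map_flatMap]
    apply congrArg
    apply List.flatMap_congr
    intro e _
    rw [List.map_map]
    exact PySem.List.map_snd_enumerate e 0
  rw [hoccKeys]

-- ===== VERDICT =====
theorem calc_paths_py_spec : Claim_equal_calc_paths_py := by
  intro edges _
  unfold Spec_calc_paths_py calc_paths_py
  rw [altB]
  have hA : (edges.foldl (fun paths exits =>
        (PySem.List.permutations exits 2).foldl
          (fun d path => d.modify (path.getD 0 0) [] (fun l => l ++ [path.getD 1 0])) paths)
        PySem.Dict.empty)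
      = (edges.flatMap pairsOf).foldl
          (fun d p => d.modify p.1 [] (fun l => l ++ [p.2])) PySem.Dict.empty := by
    rw [List.foldl_flatMap]
    apply PySem.List.foldl_congr_mem'
    intro e _ d
    unfold pairsOf
    rw [List.foldl_map]
  rw [hA]
  have hnodupA : ((edges.flatMap pairsOf).foldl
      (fun d p => d.modify p.1 [] (fun l => l ++ [p.2])) PySem.Dict.empty).keys.Nodup := by
    apply PySem.Dict.nodup_keys_foldl_modify_key (edges.flatMap pairsOf) Prod.fst []
      (fun _ p => fun l => l ++ [p.2])
    simp [PySem.Dict.keys, PySem.Dict.empty]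
  -- A's lookups
  have hgetA : ∀ k, ((edges.flatMap pairsOf).foldl
      (fun d p => d.modify p.1 [] (fun l => l ++ [p.2])) PySem.Dict.empty).getD k []
      = (edges.filter (fun e => 1 < e.length)).flatMap (fun e => complB e k) := by
    intro k
    rw [PySem.Dict.getD_foldl_modify_append]
    have hempty : (PySem.Dict.empty : PySem.Dict Int (List Int)).getD k [] = [] := rfl
    rw [hempty, List.nil_append, List.filter_flatMap, List.map_flatMap]
    rw [List.flatMap_congr (fun e _ => filter_map_pairsOf e k)]
    rw [flatMap_eq_flatMap_filter (fun e => 1 < e.length) (fun e => selA e k) edges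
      (fun e _ hne => selA_short e k (by simpa using hne))]
    exact (List.flatMap_congr (fun e _ => (complB_eq_selA e k))).symm
  -- A's keys
  have hkeysA : ((edges.flatMap pairsOf).foldl
      (fun d p => d.modify p.1 [] (fun l => l ++ [p.2])) PySem.Dict.empty).keys
      = PySem.List.dedup ((edges.filter (fun e => 1 < e.length)).flatMap id) := by
    rw [PySem.Dict.keys_foldl_modify_key (edges.flatMap pairsOf) Prod.fst []
      (fun _ p => fun l => l ++ [p.2])]
    have hek : (PySem.Dict.empty : PySem.Dict Int (List Int)).keys = PySem.Set.empty := rfl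
    rw [hek, PySem.Set.update_empty, PySem.List.dedup_eq_ofList,
      PySem.Set.ofList_eq_foldl, PySem.Set.ofList_eq_foldl,
      List.map_flatMap, List.foldl_flatMap, List.foldl_flatMap]
    rw [PySem.List.foldl_congr_mem' edges _
      (fun s e => if 1 < e.length then e.foldl PySem.Set.add s else s) []
      (fun e _ s => foldl_add_firsts e s)]
    rw [PySem.List.foldl_ite_eq_foldl_filter]
    rfl
  rw [PySem.Dict.items_eq_map_keys _ hnodupA [], hkeysA]
  apply List.map_congr_left
  intro k _
  rw [hgetA k]
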